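-- pv_equiv track=rewrite | github.com/reimbazz/Unifei | 3 semestre/Algoritmos_prog2/trabalho1/BuscaBinaria.py | remove_larger_than_target
-- ===== SOURCE A (Python) =====
-- def remove_larger_than_target(data, target):
--     index = 0
--     while index < len(data):
--         if data[index] > target:
--             data.remove(data[index])
--         else:
--             index += 1
--
--     return data
-- ===== SOURCE B (Python) =====
-- def remove_larger_than_target(data, target):
--     # Single in-place compaction pass with a write cursor, instead of repeated list.remove.
--     w = 0
--     for r in range(len(data)):
--         if not (data[r] > target):
--             data[w] = data[r]
--             w += 1
--     del data[w:]
--     return data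
-- ===== Notes on version B (the rewrite author's own statement) =====
-- stated objective: faster
-- what changed: Replaces A's while-loop with repeated O(n) list.remove calls by a single linear two-pointer compaction pass (write cursor + truncation), still mutating the same list in place.
import Mathlib
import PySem

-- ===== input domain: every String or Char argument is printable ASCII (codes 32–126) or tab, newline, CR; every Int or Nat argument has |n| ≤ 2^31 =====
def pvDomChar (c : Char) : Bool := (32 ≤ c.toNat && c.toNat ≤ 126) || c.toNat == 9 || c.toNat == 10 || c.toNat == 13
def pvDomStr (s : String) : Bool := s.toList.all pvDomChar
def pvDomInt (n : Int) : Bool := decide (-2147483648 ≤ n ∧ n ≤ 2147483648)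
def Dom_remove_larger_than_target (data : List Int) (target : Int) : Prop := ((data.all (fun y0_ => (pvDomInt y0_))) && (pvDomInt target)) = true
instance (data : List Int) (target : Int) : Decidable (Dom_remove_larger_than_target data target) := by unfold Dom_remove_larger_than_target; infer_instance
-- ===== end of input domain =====

-- B replaces A's quadratic repeated list.remove with one linear write-cursor compaction pass
-- (both mutate the caller's list in place in Python; the equivalence proved here is about the
-- returned value, which is that same list).

-- ===== PORT A =====
-- while index < len(data): if data[index] > target: data.remove(data[index]) else: index += 1
def pvGoA (target : Int) (data : List Int) (index : Nat) : List Int :=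
  if h : index < data.length then
    if data[index] > target then
      match hr : PySem.List.remove? data data[index] with
      | some d' => pvGoA target d' index
      | none => []     -- unreachable: data[index] ∈ data, so remove? never returns none
    else pvGoA target data (index + 1)
  else data
termination_by data.length - index
decreasing_by
  · have hm : data[index] ∈ data := List.getElem_mem h
    rw [PySem.List.remove?_eq_some_erase data data[index] hm] at hr
    have hlen : d'.length = data.length - 1 := by
      cases hr; exact List.length_erase_of_mem hm
    omega
  · omega

def remove_larger_than_target (data : List Int) (target : Int) : List Int :=
  pvGoA target data 0

-- ===== PORT B =====
-- w = 0; for r in range(len(data)): if not (data[r] > target): data[w] = data[r]; w += 1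
-- data[r] read via pyGet? (r always in range, so 'none' is unreachable);
-- data[w] = v is List.set (exact: w is a nonnegative in-range index); del data[w:] is take w.
def pvGoBStep (target : Int) (st : List Int × Nat) (r : Int) : List Int × Nat :=
  match PySem.List.pyGet? st.1 r with
  | some v => if ¬ v > target then (st.1.set st.2 v, st.2 + 1) else st
  | none => st       -- unreachable

def remove_larger_than_target_alt (data : List Int) (target : Int) : List Int :=
  let st := (PySem.List.pyRange 0 data.length 1).foldl (pvGoBStep target) (data, 0)
  st.1.take st.2

-- ===== PRECONDITION & SPEC =====
def Spec_remove_larger_than_target (data : List Int) (target : Int) (out : List Int) : Prop := out = remove_larger_than_target_alt data target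
instance (data : List Int) (target : Int) (out : List Int) : Decidable (Spec_remove_larger_than_target data target out) := by unfold Spec_remove_larger_than_target; infer_instance

-- ===== CLAIM (what is proved, stated in full; the proofs are below) =====
def Claim_equal_remove_larger_than_target : Prop := ∀ (data : List Int) (target : Int), Dom_remove_larger_than_target data target → Spec_remove_larger_than_target data target (remove_larger_than_target data target)

-- ===== LEMMAS AND PROOFS =====

-- removing the head occurrence of x from pre ++ x :: rest when x ∉ pre
theorem pvRemove_middle (pre rest : List Int) (x : Int) (hx : x ∉ pre) :
    PySem.List.remove? (pre ++ x :: rest) x = some (pre ++ rest) := by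
  induction pre with
  | nil => simp [PySem.List.remove?_cons_self]
  | cons a pre ih =>
    have ha : a ≠ x := by intro h; exact hx (h ▸ List.mem_cons_self)
    have hx' : x ∉ pre := fun h => hx (List.mem_cons_of_mem _ h)
    simp only [List.cons_append, PySem.List.remove?_cons_of_ne _ ha, ih hx', Option.map_some]

-- A's loop computes: kept prefix ++ filter of the unscanned suffix
theorem pvGoA_eq (target : Int) (data pre : List Int) (hpre : ∀ x ∈ pre, x ≤ target) :
    pvGoA target (pre ++ data) pre.length = pre ++ data.filter (fun x => decide (x ≤ target)) := by
  induction data generalizing pre with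
  | nil =>
    rw [pvGoA]
    simp
  | cons x rest ih =>
    rw [pvGoA]
    have hlt : pre.length < (pre ++ x :: rest).length := by simp
    have hget : (pre ++ x :: rest)[pre.length] = x := by
      simp [List.getElem_append_right (Nat.le_refl pre.length)]
    rw [dif_pos hlt]
    simp only [hget]
    by_cases hx : x > target
    · rw [if_pos hx]
      have hnx : x ∉ pre := fun h => absurd hx (not_lt.mpr (hpre x h))
      split
      · rename_i d' hd'
        rw [hget, pvRemove_middle pre rest x hnx] at hd'
        cases hd'
        rw [ih pre hpre, List.filter_cons]
        simp [not_le.mpr hx]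
      · rename_i hnone
        rw [hget, pvRemove_middle pre rest x hnx] at hnone
        exact absurd hnone (by simp)
    · rw [if_neg hx]
      have hsplit : pre ++ x :: rest = (pre ++ [x]) ++ rest := by simp
      rw [hsplit]
      have hlen : pre.length + 1 = (pre ++ [x]).length := by simp
      rw [hlen, ih (pre ++ [x]) (by intro y hy; rcases List.mem_append.mp hy with h | h
                                    · exact hpre y h
                                    · simp at h; omega)]
      rw [List.filter_cons]
      simp [not_lt.mp hx]

-- B's loop invariant: after scanning the first n elements the list is
-- (kept elements) ++ (original tail from the write cursor), cursor = number kept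
theorem pvGoB_inv (target : Int) (data : List Int) (n : Nat) (hn : n ≤ data.length) :
    (PySem.List.pyRange 0 n 1).foldl (pvGoBStep target) (data, 0) =
      (((data.take n).filter (fun x => decide (x ≤ target))) ++
        data.drop ((data.take n).filter (fun x => decide (x ≤ target))).length,
       ((data.take n).filter (fun x => decide (x ≤ target))).length) := by
  induction n with
  | zero => simp [PySem.List.pyRange_one_eq_nil]
  | succ n ih =>
    have hn' : n ≤ data.length := Nat.le_of_succ_le hn
    have hrange : PySem.List.pyRange 0 ((n : Int) + 1) 1 =
        PySem.List.pyRange 0 (n : Int) 1 ++ [(n : Int)] := by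
      exact PySem.List.pyRange_one_succ_right (by positivity)
    have hcast : ((n + 1 : Nat) : Int) = (n : Int) + 1 := by omega
    rw [hcast, hrange, List.foldl_append, ih hn']
    set K := (data.take n).filter (fun x => decide (x ≤ target)) with hK
    have hKlen : K.length ≤ n := le_trans (List.length_filter_le _ _) (by simp)
    have hnlt : n < data.length := hn
    -- the read: element n of K ++ data.drop K.length is data[n]
    have hgetn : PySem.List.pyGet? (K ++ data.drop K.length) (n : Int) = some data[n] := by
      have h1 : (n : Int) = ((K.length : Nat) : Int) + ((n - K.length : Nat) : Int) := by
        push_cast; omega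
      rw [h1, PySem.List.pyGet?_append_right]
      rw [List.getElem?_drop]
      have h2 : K.length + (n - K.length) = n := by omega
      rw [h2, List.getElem?_eq_getElem hnlt]
    have htake : data.take (n + 1) = data.take n ++ [data[n]] := by
      rw [List.take_add_one, List.getElem?_eq_getElem hnlt]; rfl
    simp only [List.foldl_cons, List.foldl_nil, pvGoBStep, hgetn]
    by_cases hx : data[n] > target
    · rw [if_neg (by simpa using hx)]
      have hsame : (data.take (n + 1)).filter (fun x => decide (x ≤ target)) = K := by
        rw [htake, List.filter_append, List.filter_singleton]
        simp [not_le.mpr hx, hK]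
      rw [hsame]
    · rw [if_pos (by simpa using hx)]
      have hK' : (data.take (n + 1)).filter (fun x => decide (x ≤ target)) = K ++ [data[n]] := by
        rw [htake, List.filter_append, List.filter_singleton]
        simp [not_lt.mp hx, hK]
      rw [hK']
      -- the write: setting position K.length of K ++ data.drop K.length to data[n]
      have hdrop : data.drop K.length = data[K.length] :: data.drop (K.length + 1) := by
        rw [List.drop_eq_getElem_cons (by omega)]
      have hset : (K ++ data.drop K.length).set K.length data[n] =
          (K ++ [data[n]]) ++ data.drop (K.length + 1) := by
        rw [List.set_append_right _ _ (Nat.le_refl _), Nat.sub_self, hdrop,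
          List.set_cons_zero, List.append_assoc, List.singleton_append]
      simp only [hset]
      have hlen2 : (K ++ [data[n]]).length = K.length + 1 := by simp
      rw [hlen2]

theorem pvB_eq_filter (data : List Int) (target : Int) :
    remove_larger_than_target_alt data target =
      data.filter (fun x => decide (x ≤ target)) := by
  unfold remove_larger_than_target_alt
  have h := pvGoB_inv target data data.length (Nat.le_refl _)
  simp only [List.take_length] at h
  simp only [h]
  exact List.take_left' rfl

-- ===== VERDICT (by name: the statement is the Claim_ definition above) =====
theorem remove_larger_than_target_spec : Claim_equal_remove_larger_than_target := by
  intro data target _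
  unfold Spec_remove_larger_than_target
  rw [pvB_eq_filter]
  have h := pvGoA_eq target data [] (by simp)
  simpa [remove_larger_than_target] using h
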